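-- pv_equiv track=rewrite | github.com/coder-8bit/RTOS | Os_Test/test_os.py | find_message_tick
-- ===== SOURCE A (Python) =====
-- from typing import List, Sequence, Tuple
--
-- def find_message_tick(events: Sequence[Tuple[int, str]], message: str, occurrence: int = 1) -> int:
--     """Moi ra cột mốc Thời gian (Tick hệ thống) của một Log nhất định."""
--     count = 0
--     for tick, text in events:
--         if text == message:
--             count += 1
--             if count == occurrence:
--                 return tick
--     raise AssertionError(f"Khong tim thay occurrence #{occurrence} cua message: {message}")
-- ===== SOURCE B (Python) =====
-- def find_message_tick(events, message, occurrence=1):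
--     """Moi ra cột mốc Thời gian (Tick hệ thống) của một Log nhất định."""
--     matches = [tick for tick, text in events if text == message]
--     if 1 <= occurrence <= len(matches):
--         return matches[occurrence - 1]
--     raise AssertionError(f"Khong tim thay occurrence #{occurrence} cua message: {message}")
-- ===== Notes on version B (the rewrite author's own statement) =====
-- stated objective: simpler
-- what changed: Replaces the count-and-early-return loop with a filter-then-index decomposition: collect all matching ticks, then select the occurrence-th one or raise the same AssertionError.
import Mathlib
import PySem

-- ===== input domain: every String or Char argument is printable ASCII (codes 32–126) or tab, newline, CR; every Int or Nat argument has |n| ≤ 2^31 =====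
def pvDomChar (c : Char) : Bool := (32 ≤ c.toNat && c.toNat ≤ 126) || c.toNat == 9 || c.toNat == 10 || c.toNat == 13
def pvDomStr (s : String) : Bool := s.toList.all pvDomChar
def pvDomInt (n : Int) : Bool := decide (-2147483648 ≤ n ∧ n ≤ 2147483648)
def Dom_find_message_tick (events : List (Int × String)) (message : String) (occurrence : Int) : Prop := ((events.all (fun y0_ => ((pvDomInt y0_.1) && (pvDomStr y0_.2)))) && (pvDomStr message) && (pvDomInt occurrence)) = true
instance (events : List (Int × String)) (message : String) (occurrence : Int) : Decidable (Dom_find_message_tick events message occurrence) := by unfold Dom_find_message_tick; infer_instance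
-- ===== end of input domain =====

-- B rewrites A's count-and-early-return loop as filter-then-index (simpler decomposition, same cost).

-- ===== PORT A =====
-- A's loop with its running `count`; the final `raise AssertionError` is outside Pre_ and ported as 0.
def findA (events : List (Int × String)) (message : String) (occurrence : Int) (count : Int) : Int :=
  match events with
  | [] => 0
  | (tick, text) :: rest =>
    if text == message then
      if count + 1 == occurrence then tick
      else findA rest message occurrence (count + 1)
    else findA rest message occurrence count

def find_message_tick (events : List (Int × String)) (message : String) (occurrence : Int) : Int :=
  findA events message occurrence 0

-- ===== PORT B =====
-- B's `raise` branch is outside Pre_ and ported as 0.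
def find_message_tick_alt (events : List (Int × String)) (message : String) (occurrence : Int) : Int :=
  let ms := (events.filter (fun p => p.2 == message)).map Prod.fst
  if 1 ≤ occurrence ∧ occurrence ≤ (ms.length : Int) then
    (PySem.List.pyGet? ms (occurrence - 1)).getD 0
  else 0

-- ===== PRECONDITION & SPEC =====
-- Pre_: exactly the inputs where the Python A returns (occurrence between 1 and the number of matching events); elsewhere A raises AssertionError.
def Pre_find_message_tick (events : List (Int × String)) (message : String) (occurrence : Int) : Prop :=
  1 ≤ occurrence ∧ occurrence ≤ ((events.filter (fun p => p.2 == message)).length : Int)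
instance (events : List (Int × String)) (message : String) (occurrence : Int) : Decidable (Pre_find_message_tick events message occurrence) := by unfold Pre_find_message_tick; infer_instance

def pvWitness_find_message_tick : (List (Int × String)) × String × Int := ([(3, "a"), (5, "b"), (7, "a")], "a", 2)

def Spec_find_message_tick (events : List (Int × String)) (message : String) (occurrence : Int) (out : Int) : Prop := out = find_message_tick_alt events message occurrence
instance (events : List (Int × String)) (message : String) (occurrence : Int) (out : Int) : Decidable (Spec_find_message_tick events message occurrence out) := by unfold Spec_find_message_tick; infer_instance

-- ===== CLAIM (what is proved, stated in full; the proofs are below) =====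
def Claim_equal_find_message_tick : Prop := ∀ (events : List (Int × String)) (message : String) (occurrence : Int), Dom_find_message_tick events message occurrence → Pre_find_message_tick events message occurrence → Spec_find_message_tick events message occurrence (find_message_tick events message occurrence)

-- ===== LEMMAS AND PROOFS =====

-- The loop with accumulator `count = c` selects the (occurrence - c)-th matching tick (or 0).
theorem findA_eq (events : List (Int × String)) (message : String) (occurrence : Int) :
    ∀ c : Int, findA events message occurrence c =
      (if 1 ≤ occurrence - c ∧ occurrence - c ≤ (((events.filter (fun p => p.2 == message)).map Prod.fst).length : Int) then
         (PySem.List.pyGet? ((events.filter (fun p => p.2 == message)).map Prod.fst) (occurrence - c - 1)).getD 0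
       else 0) := by
  induction events with
  | nil =>
    intro c
    simp only [findA, List.filter_nil, List.map_nil, List.length_nil]
    split_ifs with h
    · omega
    · rfl
  | cons hd tl ih =>
    intro c
    obtain ⟨tick, text⟩ := hd
    by_cases hm : text == message
    · simp only [findA, hm, if_pos, List.filter_cons, List.map_cons, List.length_cons]
      by_cases heq : c + 1 = occurrence
      · have : (c + 1 == occurrence) = true := by simp [heq]
        simp only [this, if_pos]
        have h1 : occurrence - c = 1 := by omega
        rw [h1, if_pos (And.intro le_rfl (by push_cast; omega))]
        norm_num [PySem.List.pyGet?_zero_cons]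
      · have : (c + 1 == occurrence) = false := by simp [heq]
        simp only [this, Bool.false_eq_true, not_false_iff, if_neg]
        rw [ih (c + 1)]
        set ms := (tl.filter (fun p => p.2 == message)).map Prod.fst with hms
        by_cases hr : 1 ≤ occurrence - (c + 1) ∧ occurrence - (c + 1) ≤ (ms.length : Int)
        · rw [if_pos hr, if_pos (by push_cast; omega)]
          have h2 : occurrence - c - 1 = (occurrence - (c+1) - 1) + 1 := by omega
          have h3 : ∃ n : Nat, (n : Int) = occurrence - (c+1) - 1 := ⟨(occurrence - (c+1) - 1).toNat, by omega⟩
          obtain ⟨n, hn⟩ := h3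
          rw [h2, ← hn, PySem.List.pyGet?_cons_succ]
        · rw [if_neg hr, if_neg (by push_cast at hr ⊢; omega)]
    · simp only [findA, hm, Bool.false_eq_true, ite_false, List.filter_cons]
      exact ih c

-- ===== VERDICT (by name: the statement is the Claim_ definition above) =====
theorem find_message_tick_spec : Claim_equal_find_message_tick := by
  intro events message occurrence _ _
  unfold Spec_find_message_tick find_message_tick find_message_tick_alt
  rw [findA_eq events message occurrence 0]
  simp
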